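-- pv_equiv track=rewrite | github.com/pypi-data/pypi-mirror-396 | packages/trivialai/trivialai-0.5.16-py3-none-any.whl/trivialai/util.py | invert_md_code
-- ===== SOURCE A (Python) =====
-- from typing import (Any, AsyncIterator, Callable, Dict, Generator, List,
--                     Optional, Type, Union)
--
-- def invert_md_code(
--     md_block: str,
--     comment_start: Optional[str] = None,
--     comment_end: Optional[str] = None,
-- ) -> str:
--     """
--     Invert code vs. non-code lines in a Markdown block.
--
--     Lines inside ``` fences are left as-is.
--     Lines outside code blocks are prefixed/suffixed with comment markers.
--     """
--     lines = md_block.splitlines()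
--     in_code_block = False
--     result: list[str] = []
--     c_start = comment_start if comment_start is not None else "## "
--     c_end = comment_end if comment_end is not None else ""
--
--     for line in lines:
--         if line.strip().startswith("```"):
--             in_code_block = not in_code_block
--         else:
--             result.append(line if in_code_block else f"{c_start}{line}{c_end}")
--
--     return "\n".join(result)
-- ===== SOURCE B (Python) =====
-- def invert_md_code(md_block, comment_start=None, comment_end=None):
--     """Segment-based rewrite: split lines into alternating segments at ``` fences,
--     then comment out even (outside-code) segments and keep odd ones."""
--     c_start = "## " if comment_start is None else comment_start
--     c_end = "" if comment_end is None else comment_end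
--     segments = []
--     current = []
--     for line in md_block.splitlines():
--         if line.strip().startswith("```"):
--             segments.append(current)
--             current = []
--         else:
--             current.append(line)
--     segments.append(current)
--     out = []
--     for i, seg in enumerate(segments):
--         if i % 2 == 0:
--             out.extend(c_start + line + c_end for line in seg)
--         else:
--             out.extend(seg)
--     return "\n".join(out)
-- ===== Notes on version B (the rewrite author's own statement) =====
-- stated objective: alternative
-- what changed: A toggles an in_code flag while filtering in one pass; B first groups the lines into alternating segments split at fence lines, then renders segments by index parity (even = commented, odd = verbatim).
import Mathlib
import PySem

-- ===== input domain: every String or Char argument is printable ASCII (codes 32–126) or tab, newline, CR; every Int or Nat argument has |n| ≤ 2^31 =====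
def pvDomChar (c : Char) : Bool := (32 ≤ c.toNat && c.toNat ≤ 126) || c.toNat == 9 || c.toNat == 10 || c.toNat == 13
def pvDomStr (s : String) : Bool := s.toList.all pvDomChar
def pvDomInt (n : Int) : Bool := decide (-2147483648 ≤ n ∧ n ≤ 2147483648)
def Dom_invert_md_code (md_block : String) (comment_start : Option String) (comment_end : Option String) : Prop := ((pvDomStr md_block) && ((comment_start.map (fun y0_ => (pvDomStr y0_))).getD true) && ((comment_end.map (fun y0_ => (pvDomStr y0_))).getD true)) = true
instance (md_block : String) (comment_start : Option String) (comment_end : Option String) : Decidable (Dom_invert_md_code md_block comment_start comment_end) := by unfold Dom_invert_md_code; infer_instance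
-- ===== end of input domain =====

-- B groups the lines into alternating segments at ``` fences and renders even segments commented; same value as A's single toggle pass.

-- ===== PORT A =====
-- the shared fence test: line.strip().startswith("```")
def pvFence (line : String) : Bool := PySem.Str.startswith (PySem.Str.strip line) "```"

def invert_md_code (md_block : String) (comment_start : Option String) (comment_end : Option String) : String :=
  let lines := PySem.Str.splitlines md_block
  let c_start := comment_start.getD "## "
  let c_end := comment_end.getD ""
  let st := lines.foldl (fun (st : Bool × List String) line =>
    if pvFence line then (!st.1, st.2)
    else (st.1, st.2 ++ [if st.1 then line else c_start ++ line ++ c_end])) (false, [])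
  PySem.Str.join "\n" st.2

-- ===== PORT B =====
def invert_md_code_alt (md_block : String) (comment_start : Option String) (comment_end : Option String) : String :=
  let c_start := comment_start.getD "## "
  let c_end := comment_end.getD ""
  -- first loop: group lines into segments split at fence lines
  let st := (PySem.Str.splitlines md_block).foldl
    (fun (st : List (List String) × List String) line =>
      if pvFence line then (st.1 ++ [st.2], [])
      else (st.1, st.2 ++ [line])) ([], [])
  let segments := st.1 ++ [st.2]
  -- second loop: even-indexed segments get commented, odd ones kept verbatim
  let out := (PySem.List.enumerate segments).foldl
    (fun (out : List String) p =>
      if p.1 % 2 == 0 then out ++ p.2.map (fun line => c_start ++ line ++ c_end)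
      else out ++ p.2) []
  PySem.Str.join "\n" out

-- ===== PRECONDITION & SPEC =====
def Spec_invert_md_code (md_block : String) (comment_start : Option String) (comment_end : Option String) (out : String) : Prop := out = invert_md_code_alt md_block comment_start comment_end
instance (md_block : String) (comment_start : Option String) (comment_end : Option String) (out : String) : Decidable (Spec_invert_md_code md_block comment_start comment_end out) := by unfold Spec_invert_md_code; infer_instance

-- ===== CLAIM (what is proved, stated in full; the proofs are below) =====
def Claim_equal_invert_md_code : Prop := ∀ (md_block : String) (comment_start : Option String) (comment_end : Option String), Dom_invert_md_code md_block comment_start comment_end → Spec_invert_md_code md_block comment_start comment_end (invert_md_code md_block comment_start comment_end)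

-- ===== LEMMAS AND PROOFS =====

-- reference rendering of A's toggle pass, starting in code-state b
def pvTail (com : String → String) (b : Bool) : List String → List String
  | [] => []
  | l :: ls => if pvFence l then pvTail com (!b) ls
      else (if b then l else com l) :: pvTail com b ls

-- segments produced by B's first loop from current segment `cur`
def pvConsume (cur : List String) : List String → List (List String)
  | [] => [cur]
  | l :: ls => if pvFence l then cur :: pvConsume [] ls else pvConsume (cur ++ [l]) ls

-- rendering of segments starting at index parity of i
def pvRender (com : String → String) (i : Int) : List (List String) → List String
  | [] => []
  | s :: ss => (if i % 2 == 0 then s.map com else s) ++ pvRender com (i + 1) ss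

theorem foldA_eq (com : String → String) (ls : List String) : ∀ (b : Bool) (res : List String),
    (ls.foldl (fun (st : Bool × List String) line =>
      if pvFence line then (!st.1, st.2)
      else (st.1, st.2 ++ [if st.1 then line else com line])) (b, res)).2
      = res ++ pvTail com b ls := by
  induction ls with
  | nil => intro b res; simp [pvTail]
  | cons l ls ih =>
    intro b res
    by_cases h : pvFence l = true <;> simp [pvTail, h, ih]

theorem foldB_eq (ls : List String) : ∀ (segs : List (List String)) (cur : List String),
    (let st := ls.foldl (fun (st : List (List String) × List String) line =>
        if pvFence line then (st.1 ++ [st.2], [])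
        else (st.1, st.2 ++ [line])) (segs, cur)
     st.1 ++ [st.2]) = segs ++ pvConsume cur ls := by
  induction ls with
  | nil => intro segs cur; simp [pvConsume]
  | cons l ls ih =>
    intro segs cur
    by_cases h : pvFence l = true <;> simp [pvConsume, h, ih]

theorem renderFold_eq (com : String → String) (segs : List (List String)) : ∀ (i : Int) (out : List String),
    (PySem.List.enumerate segs i).foldl
      (fun (out : List String) p =>
        if p.1 % 2 == 0 then out ++ p.2.map com
        else out ++ p.2) out
    = out ++ pvRender com i segs := by
  induction segs with
  | nil => intro i out; simp [pvRender, PySem.List.enumerate_nil]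
  | cons s ss ih =>
    intro i out
    by_cases h : (i % 2 == 0) = true <;>
      simp only [pvRender, PySem.List.enumerate_cons, List.foldl_cons, h, if_true,
        Bool.false_eq_true, if_false, ih, List.append_assoc]

theorem parity_succ (i : Int) : ((i + 1) % 2 == 0) = !(i % 2 == 0) := by
  have := Int.emod_emod_of_dvd i (by norm_num : (2:Int) ∣ 2)
  rcases Int.emod_two_eq_zero_or_one i with h | h <;>
    simp [Int.add_emod, h]

-- the key bridge: rendering B's segments equals A's toggle pass
theorem render_consume (com : String → String) (ls : List String) :
    ∀ (cur : List String) (i : Int),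
    pvRender com i (pvConsume cur ls)
      = (if i % 2 == 0 then cur.map com else cur) ++ pvTail com (!(i % 2 == 0)) ls := by
  induction ls with
  | nil => intro cur i; simp [pvConsume, pvRender, pvTail]
  | cons l ls ih =>
    intro cur i
    by_cases h : pvFence l = true
    · simp [pvConsume, pvRender, pvTail, h, ih, parity_succ]
    · by_cases hi : (i % 2 == 0) = true <;>
        simp [pvConsume, pvTail, h, ih, hi]

-- ===== VERDICT (by name: the statement is the Claim_ definition above) =====
theorem invert_md_code_spec : Claim_equal_invert_md_code := by
  intro md cs ce _
  show invert_md_code md cs ce = invert_md_code_alt md cs ce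
  unfold invert_md_code invert_md_code_alt
  simp only [foldA_eq, foldB_eq, renderFold_eq]
  simp only [List.nil_append]
  rw [render_consume]
  simp
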